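-- pv_equiv track=rewrite | github.com/ferparra/my-skills | obsidian-plugin/skills/obsidian-zettel-manager/scripts/zettel_models.py | infer_status_from_tags
-- ===== SOURCE A (Python) =====
-- from enum import StrEnum
-- from typing import Any, Iterable
--
-- class ZettelStatus(StrEnum):
--     FLEETING = "fleeting"
--     PROCESSING = "processing"
--     PROCESSED = "processed"
--     EVERGREEN = "evergreen"
--
-- def infer_status_from_tags(frontmatter: dict[str, Any]) -> ZettelStatus:
--     tags = [str(t) for t in frontmatter.get("tags") or []]
--     if "status/evergreen" in tags:
--         return ZettelStatus.EVERGREEN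
--     if "status/processed" in tags:
--         return ZettelStatus.PROCESSED
--     if "status/processing" in tags:
--         return ZettelStatus.PROCESSING
--     return ZettelStatus.FLEETING
-- ===== SOURCE B (Python) =====
-- from enum import StrEnum
-- from typing import Any
--
--
-- class ZettelStatus(StrEnum):
--     FLEETING = "fleeting"
--     PROCESSING = "processing"
--     PROCESSED = "processed"
--     EVERGREEN = "evergreen"
--
--
-- _RANK = {"status/evergreen": 3, "status/processed": 2, "status/processing": 1}
-- _BY_RANK = [ZettelStatus.FLEETING, ZettelStatus.PROCESSING,
--             ZettelStatus.PROCESSED, ZettelStatus.EVERGREEN]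
--
--
-- def infer_status_from_tags(frontmatter: dict[str, Any]) -> ZettelStatus:
--     best = 0
--     for t in frontmatter.get("tags") or []:
--         best = max(best, _RANK.get(str(t), 0))
--     return _BY_RANK[best]
-- ===== Notes on version B (the rewrite author's own statement) =====
-- stated objective: simpler
-- what changed: Replaced the three ordered membership scans over the tag list by a single accumulating pass that keeps the maximum priority rank from a status->rank table and maps the best rank back to a status.
import Mathlib
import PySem

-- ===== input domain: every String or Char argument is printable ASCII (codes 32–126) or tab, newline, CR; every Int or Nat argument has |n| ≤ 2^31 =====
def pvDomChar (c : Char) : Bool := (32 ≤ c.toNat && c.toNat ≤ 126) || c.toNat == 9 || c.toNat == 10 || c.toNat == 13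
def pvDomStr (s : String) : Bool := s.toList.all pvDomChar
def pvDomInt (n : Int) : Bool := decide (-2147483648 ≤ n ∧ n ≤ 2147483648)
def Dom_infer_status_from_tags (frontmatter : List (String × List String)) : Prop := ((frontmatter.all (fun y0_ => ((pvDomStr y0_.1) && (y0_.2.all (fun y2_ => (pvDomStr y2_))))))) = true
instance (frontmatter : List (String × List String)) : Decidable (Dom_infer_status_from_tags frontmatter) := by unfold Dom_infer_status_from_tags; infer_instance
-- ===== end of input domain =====

-- B replaces A's three ordered membership scans by one accumulating max-rank pass over a
-- priority table (objective: simpler single pass).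

-- ===== PORT A =====
-- tags = [str(t) for t in frontmatter.get("tags") or []]  : str on a str is the identity;
-- 'or []' maps both a missing key and an empty list to []
def infer_status_from_tags (frontmatter : List (String × List String)) : String :=
  let tags : List String :=
    (match (PySem.Dict.mk frontmatter).get? "tags" with
     | none => []
     | some v => if v = [] then [] else v).map (fun t => t)
  if "status/evergreen" ∈ tags then "evergreen"
  else if "status/processed" ∈ tags then "processed"
  else if "status/processing" ∈ tags then "processing"
  else "fleeting"

-- ===== PORT B =====
def pvRankTable : PySem.Dict String Int :=
  PySem.Dict.mk [("status/evergreen", 3), ("status/processed", 2), ("status/processing", 1)]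

def pvByRank : List String := ["fleeting", "processing", "processed", "evergreen"]

def infer_status_from_tags_alt (frontmatter : List (String × List String)) : String :=
  let tags : List String :=
    match (PySem.Dict.mk frontmatter).get? "tags" with
    | none => []
    | some v => if v = [] then [] else v
  let best : Int := tags.foldl (fun b t => max b (pvRankTable.getD t 0)) 0
  PySem.List.pyGetD pvByRank best ""

-- ===== PRECONDITION & SPEC =====
def Spec_infer_status_from_tags (frontmatter : List (String × List String)) (out : String) : Prop := out = infer_status_from_tags_alt frontmatter
instance (frontmatter : List (String × List String)) (out : String) : Decidable (Spec_infer_status_from_tags frontmatter out) := by unfold Spec_infer_status_from_tags; infer_instance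

-- ===== CLAIM (what is proved, stated in full; the proofs are below) =====
def Claim_equal_infer_status_from_tags : Prop := ∀ (frontmatter : List (String × List String)), Dom_infer_status_from_tags frontmatter → Spec_infer_status_from_tags frontmatter (infer_status_from_tags frontmatter)

-- ===== LEMMAS AND PROOFS =====

-- the value of A's if-chain on a tag list, as a rank
def pvChainRank (l : List String) : Int :=
  if "status/evergreen" ∈ l then 3
  else if "status/processed" ∈ l then 2
  else if "status/processing" ∈ l then 1
  else 0

lemma pvChainRank_cons (t : String) (l : List String) :
    pvChainRank (t :: l) = max (pvRankTable.getD t 0) (pvChainRank l) := by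
  have hr : pvRankTable.getD t 0 =
      (if t = "status/evergreen" then 3
       else if t = "status/processed" then 2
       else if t = "status/processing" then 1 else 0 : Int) := by
    split_ifs with h1 h2 h3
    · subst h1; decide
    · subst h2; decide
    · subst h3; decide
    · have b1 : ("status/evergreen" == t) = false := by simp [Ne.symm h1]
      have b2 : ("status/processed" == t) = false := by simp [Ne.symm h2]
      have b3 : ("status/processing" == t) = false := by simp [Ne.symm h3]
      simp [pvRankTable, PySem.Dict.getD_eq_get?_getD, PySem.Dict.get?,
        List.find?, b1, b2, b3]
  rw [hr]
  simp only [pvChainRank, List.mem_cons]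
  by_cases h1 : t = "status/evergreen" <;>
  by_cases h2 : t = "status/processed" <;>
  by_cases h3 : t = "status/processing" <;>
  simp [h1, h2, h3] <;> split_ifs <;> simp_all

lemma pvFoldl_rank (l : List String) (acc : Int) (hacc : 0 ≤ acc) :
    l.foldl (fun b t => max b (pvRankTable.getD t 0)) acc = max acc (pvChainRank l) := by
  induction l generalizing acc with
  | nil => simp [pvChainRank]; omega
  | cons t l ih =>
    rw [List.foldl_cons, ih (max acc (pvRankTable.getD t 0)) (by omega), pvChainRank_cons]
    omega

lemma pvChainRank_nonneg (l : List String) : 0 ≤ pvChainRank l := by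
  unfold pvChainRank; split_ifs <;> omega

-- ===== VERDICT (by name: the statement is the Claim_ definition above) =====
theorem infer_status_from_tags_spec : Claim_equal_infer_status_from_tags := by
  intro fm _
  unfold Spec_infer_status_from_tags infer_status_from_tags infer_status_from_tags_alt
  set tags : List String :=
    (match (PySem.Dict.mk fm).get? "tags" with
     | none => []
     | some v => if v = [] then [] else v) with htags
  simp only [List.map_id_fun', id, pvFoldl_rank _ 0 le_rfl,
    max_eq_right (pvChainRank_nonneg tags)]
  unfold pvChainRank
  split_ifs <;> rfl
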